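-- pv_equiv track=rewrite | github.com/CG4002-B06/External_Comm | ClassificationAlgo.py | find_consecutive_num
-- ===== SOURCE A (Python) =====
-- def find_consecutive_num(arr):
--     curr_num = None
--     curr_count = 0
--     for num in arr:
--         if num == curr_num:
--             curr_count += 1
--             if curr_count == 5:
--                 return num
--         else:
--             curr_num = num
--             curr_count = 1
--     return 3  # no action
-- ===== SOURCE B (Python) =====
-- def find_consecutive_num(arr):
--     for i in range(len(arr) - 4):
--         if arr[i] == arr[i + 1] == arr[i + 2] == arr[i + 3] == arr[i + 4]:
--             return arr[i]
--     return 3  # no action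
-- ===== Notes on version B (the rewrite author's own statement) =====
-- stated objective: alternative
-- what changed: Replaces A's run-length state machine (curr_num/curr_count accumulator) with a stateless sliding-window scan: for each index i it checks directly whether arr[i..i+4] are all equal and returns the first such arr[i].
import Mathlib
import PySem

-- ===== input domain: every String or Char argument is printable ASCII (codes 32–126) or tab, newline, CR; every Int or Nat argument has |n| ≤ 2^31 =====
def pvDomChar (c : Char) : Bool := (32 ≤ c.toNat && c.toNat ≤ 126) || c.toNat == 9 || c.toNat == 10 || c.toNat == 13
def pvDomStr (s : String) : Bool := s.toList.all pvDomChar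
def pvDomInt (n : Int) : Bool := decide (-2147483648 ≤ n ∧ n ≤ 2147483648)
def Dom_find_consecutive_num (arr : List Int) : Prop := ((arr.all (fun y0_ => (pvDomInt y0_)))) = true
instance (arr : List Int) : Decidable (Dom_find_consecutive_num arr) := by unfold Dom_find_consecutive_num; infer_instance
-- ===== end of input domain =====

-- B replaces A's run-length state machine (curr_num/curr_count) with a stateless
-- sliding-window scan that checks arr[i..i+4] for equality at each index; alternative, same cost.
-- ===== PORT A =====
-- the for-loop with state (curr_num, curr_count); early return on curr_count == 5
def findALoop : List Int → Option Int → Int → Int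
  | [], _, _ => 3
  | n :: rest, curr, cnt =>
      if some n = curr then
        if cnt + 1 = 5 then n else findALoop rest curr (cnt + 1)
      else findALoop rest (some n) 1

def find_consecutive_num (arr : List Int) : Int := findALoop arr none 0

-- ===== PORT B =====
-- the chained comparison arr[i] == arr[i+1] == ... == arr[i+4] (the loop bound keeps all indices in range)
def bWin (arr : List Int) (i : Nat) : Bool :=
  (arr.getD i 0 == arr.getD (i+1) 0) && (arr.getD (i+1) 0 == arr.getD (i+2) 0) &&
  (arr.getD (i+2) 0 == arr.getD (i+3) 0) && (arr.getD (i+3) 0 == arr.getD (i+4) 0)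

-- for i in range(len(arr) - 4): … ; return 3  (fuel = number of remaining iterations)
def bLoop (arr : List Int) : Nat → Nat → Int
  | _, 0 => 3
  | i, f+1 => if bWin arr i then arr.getD i 0 else bLoop arr (i+1) f

def find_consecutive_num_alt (arr : List Int) : Int := bLoop arr 0 (arr.length - 4)

-- ===== PRECONDITION & SPEC =====
def Spec_find_consecutive_num (arr : List Int) (out : Int) : Prop := out = find_consecutive_num_alt arr
instance (arr : List Int) (out : Int) : Decidable (Spec_find_consecutive_num arr out) := by unfold Spec_find_consecutive_num; infer_instance

-- ===== CLAIM (what is proved, stated in full; the proofs are below) =====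
def Claim_equal_find_consecutive_num : Prop := ∀ (arr : List Int), Dom_find_consecutive_num arr → Spec_find_consecutive_num arr (find_consecutive_num arr)

-- ===== LEMMAS AND PROOFS =====
-- proof-side middle man: window search expressed as structural recursion on the list
def winAt (l : List Int) : Bool :=
  decide (5 ≤ l.length) && (l.getD 0 0 == l.getD 1 0) && (l.getD 1 0 == l.getD 2 0) &&
  (l.getD 2 0 == l.getD 3 0) && (l.getD 3 0 == l.getD 4 0)

def wsearch : List Int → Int
  | [] => 3
  | a :: r => if winAt (a :: r) then a else wsearch r

theorem winAt_short (l : List Int) (h : l.length < 5) : ¬ (winAt l = true) := by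
  simp [winAt]; omega

theorem wsearch_short (l : List Int) (h : l.length < 5) : wsearch l = 3 := by
  induction l with
  | nil => rfl
  | cons a r ih =>
      rw [wsearch, if_neg (winAt_short _ h)]
      exact ih (by simp only [List.length_cons] at h; omega)

theorem winAt_block (x y : Int) (rest : List Int) (hxy : y ≠ x) (c : Nat) (hc : c ≤ 3) :
    ¬ (winAt (x :: (List.replicate c x ++ y :: rest)) = true) := by
  have hxy' : x ≠ y := fun h => hxy h.symm
  interval_cases c <;> (intro h; simp [winAt, List.replicate] at h; tauto)

theorem wsearch_skip (x y : Int) (rest : List Int) (hxy : y ≠ x) :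
    ∀ cnt : Nat, cnt ≤ 4 → wsearch (List.replicate cnt x ++ y :: rest) = wsearch (y :: rest)
  | 0, _ => by simp
  | c+1, h => by
      rw [List.replicate_succ, List.cons_append, wsearch,
        if_neg (winAt_block x y rest hxy c (by omega))]
      exact wsearch_skip x y rest hxy c (by omega)

theorem loopA_eq (l : List Int) : ∀ (x : Int) (cnt : Nat), 1 ≤ cnt → cnt ≤ 4 →
    findALoop l (some x) (cnt : Int) = wsearch (List.replicate cnt x ++ l) := by
  induction l with
  | nil =>
      intro x cnt h1 h4
      rw [findALoop, wsearch_short]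
      simp; omega
  | cons y rest ih =>
      intro x cnt h1 h4
      by_cases hy : y = x
      · subst hy
        by_cases h5 : cnt = 4
        · subst h5
          rw [findALoop]
          norm_num
          rw [show List.replicate 4 y ++ y :: rest = y::y::y::y::y::rest by simp [List.replicate]]
          rw [wsearch]
          simp [winAt]
        · have hne : ¬ ((cnt : Int) + 1 = 5) := by omega
          rw [findALoop]
          simp only [if_neg hne]
          rw [show ((cnt : Int) + 1) = (((cnt + 1 : Nat)) : Int) by push_cast; ring]
          rw [ih y (cnt+1) (by omega) (by omega), List.replicate_succ']
          simp
      · rw [findALoop, if_neg (by simp [hy])]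
        rw [show (1 : Int) = ((1 : Nat) : Int) by norm_num]
        rw [ih y 1 (by omega) (by omega)]
        simp only [List.replicate, List.singleton_append]
        exact (wsearch_skip x y rest hy cnt h4).symm

theorem getD_drop (arr : List Int) (i j : Nat) :
    (arr.drop i).getD j 0 = arr.getD (i + j) 0 := by
  simp [List.getD_eq_getElem?_getD, List.getElem?_drop]

theorem bridge (arr : List Int) : ∀ (f i : Nat), f = arr.length - 4 - i →
    bLoop arr i f = wsearch (arr.drop i) := by
  intro f
  induction f with
  | zero =>
      intro i h
      rw [bLoop, wsearch_short]
      simp; omega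
  | succ f ih =>
      intro i h
      have hi : i < arr.length := by omega
      rw [bLoop, List.drop_eq_getElem_cons hi, wsearch]
      rw [← List.drop_eq_getElem_cons hi]
      have hwin : winAt (arr.drop i) = bWin arr i := by
        simp only [winAt, bWin, getD_drop, Nat.add_zero]
        rw [show decide (5 ≤ (arr.drop i).length) = true by simp; omega, Bool.true_and]
      rw [hwin]
      by_cases hb : bWin arr i = true
      · rw [if_pos hb, if_pos hb, List.getD_eq_getElem]
      · rw [if_neg hb, if_neg hb]
        exact ih (i+1) (by omega)

-- ===== VERDICT (by name: the statement is the Claim_ definition above) =====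
theorem find_consecutive_num_spec : Claim_equal_find_consecutive_num := by
  unfold Claim_equal_find_consecutive_num
  intro arr _
  unfold Spec_find_consecutive_num
  cases arr with
  | nil => rfl
  | cons x rest =>
      show findALoop (x :: rest) none 0 = find_consecutive_num_alt (x :: rest)
      rw [findALoop, if_neg (by simp)]
      rw [show (1 : Int) = ((1 : Nat) : Int) by norm_num]
      rw [loopA_eq rest x 1 (by omega) (by omega)]
      unfold find_consecutive_num_alt
      rw [bridge (x :: rest) ((x :: rest).length - 4) 0 (by omega)]
      simp [List.replicate]
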